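-- pv_equiv track=rewrite | github.com/mauro-20/The-python-workbook | chap6/ex138.py | text_to_keypad
-- ===== SOURCE A (Python) =====
-- def text_to_keypad(text: str):
--     keypad = {1: ['.', ',', '?', '!', ':'],
--               2: ['A', 'B', 'C'],
--               3: ['D', 'E', 'F'],
--               4: ['G', 'H', 'I'],
--               5: ['J', 'K', 'L'],
--               6: ['M', 'N', 'O'],
--               7: ['P', 'Q', 'R', 'S'],
--               8: ['T', 'U', 'V'],
--               9: ['W', 'X', 'Y', 'Z'],
--               0: [' ']}
--     result = ''
--     text = text.upper()
--     for ch in text: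
--         for k in keypad:
--             val = keypad[k]
--             for el in val:
--                 if el == ch:
--                     result += str(k)*(val.index(el)+1)
--                     result += ' '
--     return result
-- ===== SOURCE B (Python) =====
-- def text_to_keypad(text: str):
--     keypad = {1: ['.', ',', '?', '!', ':'],
--               2: ['A', 'B', 'C'],
--               3: ['D', 'E', 'F'],
--               4: ['G', 'H', 'I'],
--               5: ['J', 'K', 'L'],
--               6: ['M', 'N', 'O'],
--               7: ['P', 'Q', 'R', 'S'],
--               8: ['T', 'U', 'V'],
--               9: ['W', 'X', 'Y', 'Z'],
--               0: [' ']}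
--     table = {}
--     for k, letters in keypad.items():
--         for i, el in enumerate(letters):
--             table[el] = str(k) * (i + 1) + ' '
--     return ''.join(table.get(ch, '') for ch in text.upper())
-- ===== Notes on version B (the rewrite author's own statement) =====
-- stated objective: faster
-- what changed: Replaces the per-character nested scan of the whole keypad (plus list.index) with a char->code table built once, then a single lookup pass over the upper-cased text.
import Mathlib
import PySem

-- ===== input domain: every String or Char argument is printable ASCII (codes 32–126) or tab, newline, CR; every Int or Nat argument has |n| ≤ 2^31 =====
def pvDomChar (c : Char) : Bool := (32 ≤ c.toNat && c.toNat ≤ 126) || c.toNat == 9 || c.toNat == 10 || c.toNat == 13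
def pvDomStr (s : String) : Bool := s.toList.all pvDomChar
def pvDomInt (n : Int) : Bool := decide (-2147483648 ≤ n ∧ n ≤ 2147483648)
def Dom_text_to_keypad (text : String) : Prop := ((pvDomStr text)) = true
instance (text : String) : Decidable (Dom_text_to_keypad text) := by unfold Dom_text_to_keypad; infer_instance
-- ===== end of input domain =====

-- B precomputes a flat char->code table once and makes a single lookup pass (faster by a constant factor: no per-character keypad scan).

-- ===== PORT A =====
-- the keypad dict literal, shared verbatim by both Pythons
def pvKeypad : List (Int × List Char) :=
  [(1, ['.', ',', '?', '!', ':']),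
   (2, ['A', 'B', 'C']),
   (3, ['D', 'E', 'F']),
   (4, ['G', 'H', 'I']),
   (5, ['J', 'K', 'L']),
   (6, ['M', 'N', 'O']),
   (7, ['P', 'Q', 'R', 'S']),
   (8, ['T', 'U', 'V']),
   (9, ['W', 'X', 'Y', 'Z']),
   (0, [' '])]

def text_to_keypad (text : String) : String :=
  let t := PySem.Chars.upper text.toList
  let result : List Char := t.foldl (fun result ch =>
    pvKeypad.foldl (fun result kv =>
      let val := kv.2
      val.foldl (fun result el =>
        if el == ch then
          result ++ PySem.List.pyRepeat (PySem.Int.toChars kv.1)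
              (((PySem.List.index? val el).getD 0 : Nat) + 1 : Int) ++ [' ']
        else result) result) result) []
  String.ofList result

-- ===== PORT B =====
-- Source B builds the flat table from the keypad once (helper), then one pass over the text
def pvTable : PySem.Dict Char (List Char) :=
  pvKeypad.foldl (fun table kv =>
    (PySem.List.enumerate kv.2).foldl (fun table ie =>
      table.insert ie.2
        (PySem.List.pyRepeat (PySem.Int.toChars kv.1) (ie.1 + 1) ++ [' '])) table)
    PySem.Dict.empty

def text_to_keypad_alt (text : String) : String :=
  String.ofList ((PySem.Chars.upper text.toList).flatMap (fun ch => pvTable.getD ch []))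

-- ===== PRECONDITION & SPEC =====
def Spec_text_to_keypad (text : String) (out : String) : Prop := out = text_to_keypad_alt text
instance (text : String) (out : String) : Decidable (Spec_text_to_keypad text out) := by unfold Spec_text_to_keypad; infer_instance

-- ===== CLAIM (what is proved, stated in full; the proofs are below) =====
def Claim_equal_text_to_keypad : Prop := ∀ (text : String), Dom_text_to_keypad text → Spec_text_to_keypad text (text_to_keypad text)

-- ===== LEMMAS AND PROOFS =====
-- every character occurring in the keypad
def pvLetters : List Char :=
  ['.', ',', '?', '!', ':', 'A', 'B', 'C', 'D', 'E', 'F', 'G', 'H', 'I',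
   'J', 'K', 'L', 'M', 'N', 'O', 'P', 'Q', 'R', 'S', 'T', 'U', 'V',
   'W', 'X', 'Y', 'Z', ' ']

-- A's per-character contribution, extracted from the nested loops
def pvGA (ch : Char) : List Char :=
  pvKeypad.flatMap (fun kv =>
    kv.2.flatMap (fun el =>
      if el == ch then
        PySem.List.pyRepeat (PySem.Int.toChars kv.1)
            (((PySem.List.index? kv.2 el).getD 0 : Nat) + 1 : Int) ++ [' ']
      else []))

lemma foldl_append_if_general {α β : Type} (l : List α) (p : α → Prop) [DecidablePred p] (g : α → List β) (acc : List β) :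
    l.foldl (fun acc x => if p x then acc ++ g x else acc) acc
      = acc ++ l.flatMap (fun x => if p x then g x else []) := by
  induction l generalizing acc with
  | nil => simp
  | cons x xs ih => by_cases h : p x <;> simp [h, ih]

lemma A_flat (text : String) :
    text_to_keypad text = String.ofList ((PySem.Chars.upper text.toList).flatMap pvGA) := by
  unfold text_to_keypad pvGA
  simp
  simp only [foldl_append_if_general, PySem.List.foldl_append_eq_flatMap]
  simp

lemma pointwise (ch : Char) : pvGA ch = pvTable.getD ch [] := by
  by_cases h : ch ∈ pvLetters
  · fin_cases h <;> rfl
  · have hs : ∀ el : Char, el ∈ pvLetters → ¬ el = ch := by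
      rintro el hel rfl; exact h hel
    have hs2 : ∀ el : Char, el ∈ pvLetters → ¬ ch = el := by
      rintro el hel rfl; exact h hel
    have hA : pvGA ch = [] := by
      simp only [pvGA, pvKeypad]
      simp
      repeat' apply And.intro
      all_goals exact hs _ (by decide)
    have hB : pvTable.getD ch [] = [] := by
      simp only [pvTable, pvKeypad, PySem.List.enumerate, List.foldl]
      simp [PySem.Dict.getD_insert, PySem.Dict.getD_empty, hs2, pvLetters]
    rw [hA, hB]

-- ===== VERDICT (by name: the statement is the Claim_ definition above) =====
theorem text_to_keypad_spec : Claim_equal_text_to_keypad := by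
  intro text _
  unfold Spec_text_to_keypad text_to_keypad_alt
  rw [A_flat]
  congr 1
  exact List.flatMap_congr (fun c _ => pointwise c)
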